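-- pv_equiv track=rewrite | github.com/ZainTechnologiesLTD/ZAIN-HMS | apps/core/management/commands/validate_migrations.py | estimate_migration_time
-- ===== SOURCE A (Python) =====
-- def estimate_migration_time(migrations):
--     """Estimate migration time based on operations"""
--     # This is a rough estimation
--     total_time = 0
--
--     for migration in migrations:
--         # Base time per migration
--         total_time += 5  # seconds
--
--         # Add time based on table size estimates
--         # In a real implementation, you'd query actual table sizes
--         total_time += 10  # additional seconds for safety
--
--     if total_time > 60:
--         return f"{total_time // 60} minutes {total_time % 60} seconds"
--     else:
--         return f"{total_time} seconds"
-- ===== SOURCE B (Python) =====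
-- def estimate_migration_time(migrations):
--     """Estimate migration time based on operations"""
--     n = len(migrations)
--     if n > 4:  # 15*n > 60  <=>  n > 4
--         minutes, rem = divmod(n, 4)
--         return f"{minutes} minutes {15 * rem} seconds"
--     return f"{15 * n} seconds"
-- ===== Notes on version B (the rewrite author's own statement) =====
-- stated objective: simpler
-- what changed: Drops the accumulation loop and the total_time variable entirely: branches on the migration count n > 4 and formats minutes/seconds directly from divmod(n, 4), never materialising the total seconds in the minutes branch.
import Mathlib
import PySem

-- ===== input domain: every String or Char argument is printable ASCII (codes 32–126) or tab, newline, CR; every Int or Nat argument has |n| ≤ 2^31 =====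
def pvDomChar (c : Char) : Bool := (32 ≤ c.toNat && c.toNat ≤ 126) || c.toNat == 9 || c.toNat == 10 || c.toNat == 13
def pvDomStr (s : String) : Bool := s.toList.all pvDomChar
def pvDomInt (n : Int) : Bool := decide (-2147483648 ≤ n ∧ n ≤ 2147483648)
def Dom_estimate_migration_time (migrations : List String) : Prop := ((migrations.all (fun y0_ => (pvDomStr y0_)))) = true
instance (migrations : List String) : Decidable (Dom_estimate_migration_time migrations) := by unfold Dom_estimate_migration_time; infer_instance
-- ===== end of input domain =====

-- B drops A's accumulation loop: it branches on the migration count and formats via divmod(n,4) (simpler, O(1)).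

-- ===== PORT A =====
def estimate_migration_time (migrations : List String) : String :=
  let total_time : Int :=
    migrations.foldl (fun total_time _migration =>
      let total_time := total_time + 5   -- base time per migration
      let total_time := total_time + 10  -- additional seconds for safety
      total_time) 0
  if total_time > 60 then
    PySem.Int.toStr (PySem.Int.floordiv total_time 60) ++ " minutes " ++
      PySem.Int.toStr (PySem.Int.mod total_time 60) ++ " seconds"
  else
    PySem.Int.toStr total_time ++ " seconds"

-- ===== PORT B =====
def estimate_migration_time_alt (migrations : List String) : String :=
  let n : Int := (migrations.length : Int)
  if n > 4 then
    let minutes := PySem.Int.floordiv n 4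
    let rem := PySem.Int.mod n 4
    PySem.Int.toStr minutes ++ " minutes " ++ PySem.Int.toStr (15 * rem) ++ " seconds"
  else
    PySem.Int.toStr (15 * n) ++ " seconds"

-- ===== PRECONDITION & SPEC =====
def Spec_estimate_migration_time (migrations : List String) (out : String) : Prop := out = estimate_migration_time_alt migrations
instance (migrations : List String) (out : String) : Decidable (Spec_estimate_migration_time migrations out) := by unfold Spec_estimate_migration_time; infer_instance

-- ===== CLAIM (what is proved, stated in full; the proofs are below) =====
def Claim_equal_estimate_migration_time : Prop := ∀ (migrations : List String), Dom_estimate_migration_time migrations → Spec_estimate_migration_time migrations (estimate_migration_time migrations)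

-- ===== LEMMAS AND PROOFS =====
theorem emt_foldl_closed (migrations : List String) (acc : Int) :
    migrations.foldl (fun t (_ : String) => t + 5 + 10) acc = acc + 15 * (migrations.length : Int) := by
  induction migrations generalizing acc with
  | nil => simp
  | cons x xs ih => simp [List.foldl, ih]; ring

-- ===== VERDICT (by name: the statement is the Claim_ definition above) =====
theorem estimate_migration_time_spec : Claim_equal_estimate_migration_time := by
  intro migrations _
  unfold Spec_estimate_migration_time estimate_migration_time estimate_migration_time_alt
  rw [show (fun (total_time : Int) (_migration : String) =>
        let total_time := total_time + 5
        let total_time := total_time + 10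
        total_time) = (fun t (_ : String) => t + 5 + 10) from rfl]
  rw [emt_foldl_closed]
  simp only [zero_add]
  generalize migrations.length = m
  by_cases h : (m : Int) > 4
  · rw [if_pos (show 15 * (m : Int) > 60 by omega), if_pos h]
    rw [PySem.Int.floordiv_eq_ediv_of_pos (show (0:Int) < 60 by norm_num),
        PySem.Int.mod_eq_emod_of_pos (show (0:Int) < 60 by norm_num),
        PySem.Int.floordiv_eq_ediv_of_pos (show (0:Int) < 4 by norm_num),
        PySem.Int.mod_eq_emod_of_pos (show (0:Int) < 4 by norm_num)]
    have e1 : 15 * (m : Int) / 60 = (m : Int) / 4 := by omega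
    have e2 : 15 * (m : Int) % 60 = 15 * ((m : Int) % 4) := by omega
    rw [e1, e2]
  · rw [if_neg (show ¬ 15 * (m : Int) > 60 by omega), if_neg h]
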